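-- pv_equiv track=rewrite | github.com/DHJariwala/coding_challenges | pupil plan/day 1/is_it_rated.py | isRated
-- ===== SOURCE A (Python) =====
-- def isRated(ratings):
--     for x in ratings:
--         if x[0] != x[1]:
--             return "rated"
--     flag = 1
--     for i in range(1,len(ratings)):
--         if ratings[i][1] > ratings[i-1][1]:
--             flag = 0
--             break
--     if flag:
--         return "maybe"
--     else:
--         return "unrated"
-- ===== SOURCE B (Python) =====
-- def isRated(ratings):
--     if any(x[0] != x[1] for x in ratings):
--         return "rated"
--     seconds = [x[1] for x in ratings]
--     return "maybe" if seconds == sorted(seconds, reverse=True) else "unrated"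
-- ===== Notes on version B (the rewrite author's own statement) =====
-- stated objective: simpler
-- what changed: Replaces the index/flag/break adjacency scan with an any() check plus extracting the second column and comparing it to its descending sort.
import Mathlib
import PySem

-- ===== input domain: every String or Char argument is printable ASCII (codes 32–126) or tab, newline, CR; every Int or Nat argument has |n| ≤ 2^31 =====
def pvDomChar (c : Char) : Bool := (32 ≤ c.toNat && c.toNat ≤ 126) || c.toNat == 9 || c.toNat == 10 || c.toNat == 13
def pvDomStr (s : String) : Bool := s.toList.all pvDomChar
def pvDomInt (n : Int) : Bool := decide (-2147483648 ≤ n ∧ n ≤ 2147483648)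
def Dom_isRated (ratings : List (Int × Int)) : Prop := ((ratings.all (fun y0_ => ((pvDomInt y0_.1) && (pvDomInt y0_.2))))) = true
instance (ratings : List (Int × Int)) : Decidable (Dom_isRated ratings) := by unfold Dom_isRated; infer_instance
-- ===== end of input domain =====

-- B replaces A's index/flag/break adjacency scan by an any() check plus comparing the
-- second column to its descending sort (objective: simpler).

-- ===== PORT A =====
-- first loop: return "rated" on the first pair with x[0] != x[1]
def pvA_first : List (Int × Int) → Option String
  | [] => none
  | x :: xs => if x.1 ≠ x.2 then some "rated" else pvA_first xs

-- second loop over i in range(1, len(ratings)), with break modelled by stopping the recursion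
def pvA_flag (ratings : List (Int × Int)) : List Int → Int
  | [] => 1
  | i :: rest =>
    match PySem.List.pyGet? ratings i, PySem.List.pyGet? ratings (i - 1) with
    | some a, some b => if a.2 > b.2 then 0 else pvA_flag ratings rest
    | _, _ => 0   -- unreachable: i ∈ range(1, len)

def isRated (ratings : List (Int × Int)) : String :=
  match pvA_first ratings with
  | some s => s
  | none =>
    if pvA_flag ratings (PySem.List.pyRange 1 ratings.length 1) ≠ 0 then "maybe" else "unrated"

-- ===== PORT B =====
def isRated_alt (ratings : List (Int × Int)) : String :=
  if ratings.any (fun x => x.1 ≠ x.2) then "rated"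
  else
    let seconds := ratings.map (·.2)
    if seconds = PySem.List.sorted seconds (fun x => x) true then "maybe" else "unrated"

-- ===== PRECONDITION & SPEC =====
def Spec_isRated (ratings : List (Int × Int)) (out : String) : Prop := out = isRated_alt ratings
instance (ratings : List (Int × Int)) (out : String) : Decidable (Spec_isRated ratings out) := by unfold Spec_isRated; infer_instance

-- ===== CLAIM (what is proved, stated in full; the proofs are below) =====
def Claim_equal_isRated : Prop := ∀ (ratings : List (Int × Int)), Dom_isRated ratings → Spec_isRated ratings (isRated ratings)

-- ===== LEMMAS AND PROOFS =====

lemma pvA_first_eq (xs : List (Int × Int)) :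
    pvA_first xs = if xs.any (fun x => x.1 ≠ x.2) then some "rated" else none := by
  induction xs with
  | nil => simp [pvA_first]
  | cons x xs ih =>
    show (if x.1 ≠ x.2 then some "rated" else pvA_first xs) = _
    by_cases h : x.1 = x.2
    · have hc : ((x :: xs).any fun y => decide (y.1 ≠ y.2)) = (xs.any fun y => decide (y.1 ≠ y.2)) := by
        simp [List.any_cons, h]
      rw [if_neg (by simp [h]), ih, hc]
    · have hc : ((x :: xs).any fun y => decide (y.1 ≠ y.2)) = true := by
        simp [List.any_cons, h]
      rw [if_pos h, hc, if_pos rfl]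

-- the flag loop decides the non-increasing chain condition on the suffix
lemma pvA_flag_chain (xs : List (Int × Int)) : ∀ (k : Nat), k < xs.length →
    (pvA_flag xs (PySem.List.pyRange ((k : Int) + 1) xs.length 1) = 1 ↔
      List.IsChain (fun a b : Int × Int => b.2 ≤ a.2) (xs.drop k)) := by
  intro k hk
  induction hlen : xs.length - (k + 1) generalizing k with
  | zero =>
    have hb : (xs.length : Int) ≤ (k : Int) + 1 := by omega
    rw [PySem.List.pyRange_one_eq_nil hb]
    have hdrop : xs.drop k = [xs[k]] := by
      have : k + 1 = xs.length := by omega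
      rw [List.drop_eq_getElem_cons hk]
      simp [List.drop_eq_nil_of_le (by omega : xs.length ≤ k + 1)]
    simp [pvA_flag, hdrop]
  | succ n ih =>
    have hk1 : k + 1 < xs.length := by omega
    have hlt : ((k : Int) + 1) < (xs.length : Int) := by exact_mod_cast hk1
    rw [PySem.List.pyRange_one_cons hlt]
    have hcast : ((k : Int) + 1) = ((k + 1 : Nat) : Int) := by push_cast; ring
    have hget1 : PySem.List.pyGet? xs ((k : Int) + 1) = some xs[k + 1] := by
      rw [hcast, PySem.List.pyGet?_natCast, List.getElem?_eq_getElem hk1]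
    have hget0 : PySem.List.pyGet? xs ((k : Int) + 1 - 1) = some xs[k] := by
      have : ((k : Int) + 1 - 1) = ((k : Nat) : Int) := by ring
      rw [this, PySem.List.pyGet?_natCast, List.getElem?_eq_getElem hk]
    have hdrop : xs.drop k = xs[k] :: xs.drop (k + 1) := List.drop_eq_getElem_cons hk
    have hhead : (xs.drop (k + 1)).head? = some xs[k + 1] := by
      rw [List.head?_drop, List.getElem?_eq_getElem hk1]
    rw [hdrop]
    rw [List.isChain_cons]
    constructor
    · intro h
      simp only [pvA_flag, hget1, hget0] at h
      split_ifs at h with hgt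
      · exact absurd h (by norm_num)
      · have hrest := (ih (k + 1) hk1 (by omega)).mp (by
          have : ((k : Int) + 1 + 1) = ((k + 1 : Nat) : Int) + 1 := by push_cast; ring
          rw [← this]; exact h)
        refine ⟨?_, hrest⟩
        intro y hy
        rw [hhead] at hy
        simp at hy
        subst hy
        omega
    · rintro ⟨hy, hrest⟩
      have hle : xs[k + 1].2 ≤ xs[k].2 := hy _ (by simp [hhead])
      simp only [pvA_flag, hget1, hget0]
      rw [if_neg (by omega)]
      have : ((k : Int) + 1 + 1) = ((k + 1 : Nat) : Int) + 1 := by push_cast; ring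
      rw [this]
      exact (ih (k + 1) hk1 (by omega)).mpr hrest

lemma isChain_iff_pairwise_sec (xs : List (Int × Int)) :
    List.IsChain (fun a b : Int × Int => b.2 ≤ a.2) xs ↔
      List.Pairwise (fun a b : Int × Int => b.2 ≤ a.2) xs :=
  @List.isChain_iff_pairwise _ _ _ ⟨fun hab hbc => le_trans hbc hab⟩

lemma chain_iff_sorted (xs : List (Int × Int)) :
    List.IsChain (fun a b : Int × Int => b.2 ≤ a.2) xs ↔
      xs.map (·.2) = PySem.List.sorted (xs.map (·.2)) (fun x => x) true := by
  rw [isChain_iff_pairwise_sec]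
  constructor
  · intro h
    exact (PySem.List.sorted_rev_eq_self_of_pairwise (xs.map (·.2)) (fun x => x)
      (by rw [List.pairwise_map]; exact h)).symm
  · intro h
    have := PySem.List.sorted_pairwise_rev (xs.map (·.2)) (fun x => x)
    rw [← h, List.pairwise_map] at this
    exact this

lemma pvA_flag_full (xs : List (Int × Int)) :
    (pvA_flag xs (PySem.List.pyRange 1 xs.length 1) = 1 ↔
      xs.map (·.2) = PySem.List.sorted (xs.map (·.2)) (fun x => x) true) := by
  rw [← chain_iff_sorted]
  cases xs with
  | nil => simp [pvA_flag, PySem.List.pyRange_one_eq_nil]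
  | cons x t =>
    have h0 : 0 < (x :: t).length := by simp
    have := pvA_flag_chain (x :: t) 0 h0
    simpa using this

lemma pvA_flag_vals (xs : List (Int × Int)) (l : List Int) :
    pvA_flag xs l = 0 ∨ pvA_flag xs l = 1 := by
  induction l with
  | nil => right; rfl
  | cons i rest ih =>
    simp only [pvA_flag]
    cases PySem.List.pyGet? xs i with
    | none => left; rfl
    | some a =>
      cases PySem.List.pyGet? xs (i - 1) with
      | none => left; rfl
      | some b =>
        dsimp only
        split_ifs
        · left; rfl
        · exact ih

-- ===== VERDICT (by name: the statement is the Claim_ definition above) =====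
theorem isRated_spec : Claim_equal_isRated := by
  intro ratings _
  unfold Spec_isRated isRated isRated_alt
  rw [pvA_first_eq]
  by_cases hr : (ratings.any fun x => decide (x.1 ≠ x.2)) = true
  · simp only [if_pos hr]
  · simp only [if_neg hr]
    by_cases hs : ratings.map (·.2) = PySem.List.sorted (ratings.map (·.2)) (fun x => x) true
    · rw [if_pos hs, if_pos]
      rw [(pvA_flag_full ratings).mpr hs]
      norm_num
    · rw [if_neg hs, if_neg]
      intro hne
      rcases pvA_flag_vals ratings (PySem.List.pyRange 1 ratings.length 1) with h | h
      · exact hne h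
      · exact hs ((pvA_flag_full ratings).mp h)
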